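-- pv_equiv track=rewrite | github.com/langlk/Cryptopals | Set1Challenge3.py | ascii_to_bin
-- ===== SOURCE A (Python) =====
-- def ascii_to_bin(ascii_string): # changes ascii string to binary string
--   bin_code = ""
--   for char in ascii_string:
--     temp_code = str(bin(ord(char)))
--     temp_code = temp_code[2:len(temp_code)] # Removes the binary prefix
--     while len(temp_code) < 8: # Standardizes length
--       temp_code = "0" + temp_code
--     bin_code += temp_code
--   return bin_code
-- ===== SOURCE B (Python) =====
-- def ascii_to_bin(ascii_string):
--     pieces = []
--     for char in ascii_string:
--         n = ord(char)
--         if n == 0: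
--             digits = "0"
--         else:
--             digits = ""
--             while n > 0:
--                 n, r = divmod(n, 2)
--                 digits = str(r) + digits
--         if len(digits) < 8:
--             digits = "0" * (8 - len(digits)) + digits
--         pieces.append(digits)
--     return "".join(pieces)
-- ===== Notes on version B (the rewrite author's own statement) =====
-- stated objective: alternative
-- what changed: Replaces bin()/prefix-slicing and the one-character-at-a-time while-loop padding with a manual divmod base-2 conversion per character, a single computed left-pad, and a join of collected pieces instead of repeated string concatenation.
import Mathlib
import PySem

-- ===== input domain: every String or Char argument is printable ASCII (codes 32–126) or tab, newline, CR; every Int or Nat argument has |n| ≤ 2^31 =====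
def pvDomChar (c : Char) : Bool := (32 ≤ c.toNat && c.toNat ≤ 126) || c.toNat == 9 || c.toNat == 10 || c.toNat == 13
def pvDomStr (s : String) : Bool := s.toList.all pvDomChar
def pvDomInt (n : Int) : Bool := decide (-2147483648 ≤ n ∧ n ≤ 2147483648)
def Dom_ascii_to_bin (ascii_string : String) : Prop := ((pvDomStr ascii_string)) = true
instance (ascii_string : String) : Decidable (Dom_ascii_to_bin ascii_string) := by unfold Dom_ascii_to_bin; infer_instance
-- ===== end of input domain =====

-- B replaces bin()/slice + char-by-char pad loop with manual divmod base-2 digits, one computed pad and a join (alternative decomposition, same cost).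

-- ===== PORT A =====
-- 'while len(temp_code) < 8: temp_code = "0" + temp_code' — fuel 8 suffices: each pass grows the length by 1 and the digit list is nonempty.
def aPadLoop (fuel : Nat) (t : List Char) : List Char :=
  match fuel with
  | 0 => t
  | f + 1 => if t.length < 8 then aPadLoop f ('0' :: t) else t

-- one body of A's 'for char in ascii_string' loop applied to bin_code
def aStep (bin_code : List Char) (c : Char) : List Char :=
  let temp_code := PySem.Int.toBinChars0b ((c.toNat : Int))          -- str(bin(ord(char)))
  let temp_code := PySem.List.slice temp_code (some 2) (some (PySem.List.len temp_code))  -- [2:len]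
  bin_code ++ aPadLoop 8 temp_code

def ascii_to_bin (ascii_string : String) : String :=
  String.ofList (ascii_string.toList.foldl aStep [])

-- ===== PORT B =====
-- 'while n > 0: n, r = divmod(n, 2); digits = str(r) + digits' — fuel 8 suffices for ord ≤ 126 (< 2^8 halvings reach 0).
def bDivLoop (fuel : Nat) (n : Int) (digits : List Char) : List Char :=
  match fuel with
  | 0 => digits
  | f + 1 =>
      if 0 < n then
        bDivLoop f (PySem.Int.floordiv n 2) (PySem.Int.toChars (PySem.Int.mod n 2) ++ digits)
      else digits

-- one character's 8-or-more-bit block in B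
def bEnc (c : Char) : List Char :=
  let n : Int := (c.toNat : Int)
  let digits := if n == 0 then ['0'] else bDivLoop 8 n []
  if digits.length < 8 then List.replicate (8 - digits.length) '0' ++ digits else digits

def ascii_to_bin_alt (ascii_string : String) : String :=
  String.ofList (PySem.Chars.join [] (ascii_string.toList.foldl (fun pieces c => pieces ++ [bEnc c]) []))

-- ===== PRECONDITION & SPEC =====
def Spec_ascii_to_bin (ascii_string : String) (out : String) : Prop := out = ascii_to_bin_alt ascii_string
instance (ascii_string : String) (out : String) : Decidable (Spec_ascii_to_bin ascii_string out) := by unfold Spec_ascii_to_bin; infer_instance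

-- ===== CLAIM (what is proved, stated in full; the proofs are below) =====
def Claim_equal_ascii_to_bin : Prop := ∀ (ascii_string : String), Dom_ascii_to_bin ascii_string → Spec_ascii_to_bin ascii_string (ascii_to_bin ascii_string)

-- ===== LEMMAS AND PROOFS =====

-- A's per-character block, named for the proofs
def aEnc (c : Char) : List Char :=
  let temp_code := PySem.Int.toBinChars0b ((c.toNat : Int))
  aPadLoop 8 (PySem.List.slice temp_code (some 2) (some (PySem.List.len temp_code)))

lemma aStep_eq (bc : List Char) (c : Char) : aStep bc c = bc ++ aEnc c := rfl

-- the two per-character encoders agree on every code point ≤ 126 (checked pointwise)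
lemma enc_agree_nat : ∀ m ∈ List.range 127,
    aEnc (Char.ofNat m) = bEnc (Char.ofNat m) := by
  set_option maxRecDepth 4000 in decide

lemma enc_agree (c : Char) (h : pvDomChar c = true) : aEnc c = bEnc c := by
  have hle : c.toNat < 127 := by
    simp [pvDomChar] at h
    omega
  have hc : Char.ofNat c.toNat = c := Char.ofNat_toNat c
  have := enc_agree_nat c.toNat (List.mem_range.mpr hle)
  rwa [hc] at this

lemma foldA (l : List Char) (acc : List Char) :
    l.foldl aStep acc = acc ++ (l.map aEnc).flatten := by
  induction l generalizing acc with
  | nil => simp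
  | cons c l ih => simp [List.foldl, aStep_eq, ih]

lemma foldB (l : List Char) (ps : List (List Char)) :
    l.foldl (fun pieces c => pieces ++ [bEnc c]) ps = ps ++ l.map bEnc := by
  induction l generalizing ps with
  | nil => simp
  | cons c l ih => simp [List.foldl, ih]

lemma join_nil_flatten (ps : List (List Char)) :
    PySem.Chars.join [] ps = ps.flatten := by
  induction ps with
  | nil => simp [PySem.Chars.join, List.intercalate]
  | cons p ps ih =>
      cases ps with
      | nil => simp [PySem.Chars.join, List.intercalate]
      | cons q qs =>
          rw [PySem.Chars.join_cons_cons]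
          simp [ih, List.flatten]

-- ===== VERDICT (by name: the statement is the Claim_ definition above) =====
theorem ascii_to_bin_spec : Claim_equal_ascii_to_bin := by
  intro s hdom
  unfold Spec_ascii_to_bin ascii_to_bin ascii_to_bin_alt
  rw [foldA, foldB, join_nil_flatten]
  simp only [List.nil_append]
  have hmap : List.map aEnc s.toList = List.map bEnc s.toList := by
    apply List.map_congr_left
    intro c hc
    exact enc_agree c (by
      have := (List.all_eq_true.mp hdom) c hc
      simpa using this)
  rw [hmap]
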